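-- pv_equiv track=rewrite | github.com/broccoli-huang/sudoku | calcudoku/arithmetic.py | possible_plus
-- ===== SOURCE A (Python) =====
-- def possible_plus(zone,blocks,result):
--     if result < zone[0]*blocks or result > zone[-1]*blocks:
--         return []
--     elif blocks == 1:
--         if result in zone:
--             return [[result]]
--         else:
--             return []
--     rli = []
--     for i in range(zone[0],result//blocks+1):
--         for j in possible_plus(range(i,zone[-1]+1),blocks-1,result-i):
--             rli.append([i]+j)
--     return rli
-- ===== SOURCE B (Python) =====
-- def possible_plus(zone, blocks, result):
--     if blocks == 1:
--         return [[result]] if (zone[0] <= result <= zone[-1] and result in zone) else []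
--     if blocks < 1:
--         return []
--     lo, hi = zone[0], zone[-1]
--     # level-wise expansion: states are (prefix, minimum next value, remaining sum)
--     states = [([], lo, result)]
--     for k in range(blocks, 1, -1):
--         if not states:
--             break
--         states = [(prefix + [v], v, rem - v)
--                   for prefix, mn, rem in states
--                   for v in range(max(mn, rem - hi * (k - 1)), rem // k + 1)]
--     return [prefix + [rem] for prefix, mn, rem in states if mn <= rem <= hi]
-- ===== Notes on version B (the rewrite author's own statement) =====
-- stated objective: alternative
-- what changed: Replaces A's recursion on shrinking range-list zones by an iterative level-wise (breadth-first) expansion of partial states over integer bounds, with a lower pruning bound rem - hi*(k-1) added to A's upper bound rem//k.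
-- outside the precondition, e.g. on possible_plus([], 2, 3): A raises IndexError, B raises IndexError; on possible_plus([1, 2], 0, 0): A raises ZeroDivisionError, B returns []; on possible_plus([2, 1], -1, -2): A raises IndexError, B returns []
import Mathlib
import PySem

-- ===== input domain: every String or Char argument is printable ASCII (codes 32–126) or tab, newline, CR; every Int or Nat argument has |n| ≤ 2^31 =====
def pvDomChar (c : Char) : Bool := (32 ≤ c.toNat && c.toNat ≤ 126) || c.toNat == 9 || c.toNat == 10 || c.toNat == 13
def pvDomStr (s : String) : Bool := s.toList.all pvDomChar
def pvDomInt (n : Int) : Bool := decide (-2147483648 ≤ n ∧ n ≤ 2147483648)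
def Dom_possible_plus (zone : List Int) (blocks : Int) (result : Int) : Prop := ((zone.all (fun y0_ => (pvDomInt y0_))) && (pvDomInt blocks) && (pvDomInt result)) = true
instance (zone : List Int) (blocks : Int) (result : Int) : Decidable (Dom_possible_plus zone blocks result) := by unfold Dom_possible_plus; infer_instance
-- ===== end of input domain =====

-- B replaces A's recursive backtracking over shrinking range zones by an iterative
-- level-wise expansion of partial states over integer bounds, with a lower pruning
-- bound added to A's upper bound (objective: alternative; comparable cost).


-- ===== PORT A =====
-- Python's recursive calls pass range(i, zone[-1]+1) objects; a range is ported as its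
-- (lo, hi) bounds: zone[0] = lo, zone[-1] = hi, and `result in range` is the exact O(1)
-- bounds test CPython performs.  The `zone = []` / empty-range and `blocks ≤ 0` branches
-- return [] where Python raises (IndexError / ZeroDivisionError) or recurses without
-- bound; all are excluded by Pre_possible_plus.
def possible_plus_rng (lo hi : Int) (blocks result : Int) : List (List Int) :=
  if hi < lo then []
  else if result < lo * blocks ∨ hi * blocks < result then []
  else if blocks = 1 then (if lo ≤ result ∧ result ≤ hi then [[result]] else [])
  else if blocks ≤ 0 then []
  else
    (PySem.List.pyRange lo (PySem.Int.floordiv result blocks + 1) 1).foldl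
      (fun acc i =>
        (possible_plus_rng i hi (blocks - 1) (result - i)).foldl
          (fun acc2 j => acc2 ++ [i :: j]) acc) []
termination_by blocks.toNat
decreasing_by all_goals omega

def possible_plus (zone : List Int) (blocks : Int) (result : Int) : List (List Int) :=
  if zone = [] then []
  else if result < zone.head! * blocks ∨ zone.getLast! * blocks < result then []
  else if blocks = 1 then (if result ∈ zone then [[result]] else [])
  else if blocks ≤ 0 then []
  else
    (PySem.List.pyRange zone.head! (PySem.Int.floordiv result blocks + 1) 1).foldl
      (fun acc i =>
        (possible_plus_rng i zone.getLast! (blocks - 1) (result - i)).foldl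
          (fun acc2 j => acc2 ++ [i :: j]) acc) []

-- ===== PORT B =====
-- one level of the comprehension: expand every state by all feasible next values
def pvExpand (hi : Int) (states : List (List Int × Int × Int)) (k : Int) :
    List (List Int × Int × Int) :=
  states.flatMap (fun s =>
    (PySem.List.pyRange (max s.2.1 (s.2.2 - hi * (k - 1)))
        (PySem.Int.floordiv s.2.2 k + 1) 1).map
      (fun v => (s.1 ++ [v], v, s.2.2 - v)))

-- the for-loop over range(blocks, 1, -1) with its early break once no states survive
def pvLevels (hi : Int) (k : Int) (states : List (List Int × Int × Int)) :
    List (List Int × Int × Int) :=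
  if k ≤ 1 then states
  else if states.isEmpty then states
  else pvLevels hi (k - 1) (pvExpand hi states k)
termination_by k.toNat
decreasing_by all_goals omega

def possible_plus_alt (zone : List Int) (blocks : Int) (result : Int) : List (List Int) :=
  if blocks = 1 then
    (if zone.head! ≤ result ∧ result ≤ zone.getLast! ∧ result ∈ zone then [[result]] else [])
  else if blocks < 1 then []
  else
    (((pvLevels zone.getLast! blocks [([], zone.head!, result)]).filter
      (fun s => decide (s.2.1 ≤ s.2.2 ∧ s.2.2 ≤ zone.getLast!))).map
      (fun s => s.1 ++ [s.2.2]))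

-- ===== PRECONDITION & SPEC =====
-- Pre_ excludes empty zones (A raises IndexError) and inputs with blocks < 1 whose
-- bound check zone[0]*blocks <= result <= zone[-1]*blocks passes: there A raises
-- ZeroDivisionError (blocks==0, result==0) or IndexError on an empty recursive zone,
-- except for a few unsorted zones where an empty loop lets A return [] as B does.
def Pre_possible_plus (zone : List Int) (blocks : Int) (result : Int) : Prop :=
  zone ≠ [] ∧ (1 ≤ blocks ∨ result < zone.head! * blocks ∨ zone.getLast! * blocks < result)
instance (zone : List Int) (blocks : Int) (result : Int) : Decidable (Pre_possible_plus zone blocks result) := by unfold Pre_possible_plus; infer_instance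

def pvWitness_possible_plus : List Int × Int × Int := ([1, 2, 3], 2, 4)

def Spec_possible_plus (zone : List Int) (blocks : Int) (result : Int) (out : List (List Int)) : Prop := out = possible_plus_alt zone blocks result
instance (zone : List Int) (blocks : Int) (result : Int) (out : List (List Int)) : Decidable (Spec_possible_plus zone blocks result out) := by unfold Spec_possible_plus; infer_instance

-- ===== CLAIM (what is proved, stated in full; the proofs are below) =====
def Claim_equal_possible_plus : Prop := ∀ (zone : List Int) (blocks : Int) (result : Int), Dom_possible_plus zone blocks result → Pre_possible_plus zone blocks result → Spec_possible_plus zone blocks result (possible_plus zone blocks result)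

-- ===== LEMMAS AND PROOFS =====

-- filter-then-map written as a flatMap (shape of B's final comprehension)
theorem map_filter_eq_flatMap {α β : Type} (p : α → Bool) (g : α → β) (l : List α) :
    (l.filter p).map g = l.flatMap (fun x => if p x then [g x] else []) := by
  induction l with
  | nil => rfl
  | cons x l ih =>
    rw [List.filter_cons, List.flatMap_cons, ← ih]
    by_cases hx : p x <;> simp [hx]

-- A with one block on a range zone is a pure bounds test
theorem A_one {hi : Int} (mn rem : Int) :
    possible_plus_rng mn hi 1 rem = if mn ≤ rem ∧ rem ≤ hi then [[rem]] else [] := by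
  by_cases hle : mn ≤ hi
  · rw [possible_plus_rng, if_neg (by omega)]
    by_cases hg : rem < mn * 1 ∨ hi * 1 < rem
    · rw [if_pos hg, if_neg (by omega)]
    · rw [if_neg hg, if_pos rfl, if_pos (by omega)]
  · rw [possible_plus_rng, if_pos (by omega), if_neg (by omega)]

-- a flatMap over a range may start later when the low part vanishes
theorem flatMap_ext_low {α : Type} (F : Int → List α) : ∀ (a a' b : Int), a ≤ a' →
    (∀ v, a ≤ v → v < a' → F v = []) →
    (PySem.List.pyRange a b 1).flatMap F = (PySem.List.pyRange a' b 1).flatMap F := by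
  intro a a' b hle hnil
  by_cases heq : a = a'
  · subst heq; rfl
  · have hlt : a < a' := lt_of_le_of_ne hle heq
    by_cases hab : a < b
    · rw [PySem.List.pyRange_one_cons hab, List.flatMap_cons,
        hnil a le_rfl hlt, List.nil_append]
      exact flatMap_ext_low F (a + 1) a' b (by omega)
        (fun v h1 h2 => hnil v (by omega) h2)
    · rw [PySem.List.pyRange_one_eq_nil (by omega),
        PySem.List.pyRange_one_eq_nil (by omega)]
termination_by a a' _ => (a' - a).toNat
decreasing_by all_goals omega

-- A returns nothing when the target exceeds hi * blocks
theorem A_high_nil {hi k rem v : Int} (hk : 1 ≤ k) (hhigh : hi * k < rem) :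
    possible_plus_rng v hi k rem = [] := by
  by_cases hle : v ≤ hi
  · rw [possible_plus_rng, if_neg (by omega), if_pos (Or.inr hhigh)]
  · rw [possible_plus_rng, if_pos (by omega)]

-- one expansion level agrees with one unfolding of A (with both prunings justified)
theorem step_eq {hi : Int} {k mn rem : Int} (p : List Int) (hk : 2 ≤ k) :
    (PySem.List.pyRange (max mn (rem - hi * (k - 1)))
        (PySem.Int.floordiv rem k + 1) 1).flatMap
      (fun v => (possible_plus_rng v hi (k - 1) (rem - v)).map
        (fun c => (p ++ [v]) ++ c)) =
    (possible_plus_rng mn hi k rem).map (fun c => p ++ c) := by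
  have hbpos : (0 : Int) < k := by omega
  have hbody : (fun v => (possible_plus_rng v hi (k - 1) (rem - v)).map
        (fun c => (p ++ [v]) ++ c))
      = fun v => ((possible_plus_rng v hi (k - 1) (rem - v)).map
          (fun c => v :: c)).map (fun c => p ++ c) := by
    funext v
    rw [List.map_map]
    apply List.map_congr_left
    intro c _
    simp
  by_cases hle : mn ≤ hi
  · by_cases hg : rem < mn * k ∨ hi * k < rem
    · -- A's bound check fails: both sides are empty
      rw [possible_plus_rng, if_neg (by omega), if_pos hg]
      rw [List.map_nil, PySem.List.pyRange_one_eq_nil ?_, List.flatMap_nil]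
      rcases hg with h | h
      · have : PySem.Int.floordiv rem k < mn := by
          rw [PySem.Int.floordiv_lt_iff_lt_mul hbpos]; exact h
        omega
      · by_contra hcon
        have hbt : max mn (rem - hi * (k - 1)) ≤ PySem.Int.floordiv rem k := by omega
        have h1 : (max mn (rem - hi * (k - 1))) * k ≤ rem :=
          (PySem.Int.le_floordiv_iff_mul_le hbpos).mp hbt
        have h2 : rem - hi * (k - 1) ≤ max mn (rem - hi * (k - 1)) := le_max_right _ _
        nlinarith
    · -- bound check passes: unfold A's loop and extend B's range downwards
      push_neg at hg
      rw [possible_plus_rng, if_neg (by omega), if_neg (by push_neg; omega),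
        if_neg (by omega), if_neg (by omega)]
      have hfun : (fun (acc : List (List Int)) (i : Int) =>
          (possible_plus_rng i hi (k - 1) (rem - i)).foldl
            (fun acc2 j => acc2 ++ [i :: j]) acc)
          = fun acc i => acc ++
              (possible_plus_rng i hi (k - 1) (rem - i)).map (fun c => i :: c) := by
        funext acc i
        rw [PySem.List.foldl_append_singleton_eq_map]
      rw [hfun, PySem.List.foldl_append_eq_flatMap, List.nil_append, List.map_flatMap,
        hbody]
      exact (flatMap_ext_low _ mn (max mn (rem - hi * (k - 1)))
        (PySem.Int.floordiv rem k + 1) (le_max_left _ _)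
        (fun v h1 h2 => by
          have hv : v < rem - hi * (k - 1) := by
            rcases lt_max_iff.mp h2 with h | h
            · omega
            · exact h
          have hnil := A_high_nil (hi := hi) (v := v)
            (show (1 : Int) ≤ k - 1 by omega)
            (show hi * (k - 1) < rem - v by linarith)
          simp only [hnil, List.map_nil])).symm
  · -- empty range zone: A returns [], and B's value range is empty too
    rw [possible_plus_rng, if_pos (by omega),
      List.map_nil, PySem.List.pyRange_one_eq_nil ?_, List.flatMap_nil]
    by_contra hcon
    have hbt : max mn (rem - hi * (k - 1)) ≤ PySem.Int.floordiv rem k := by omega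
    have h1 : (max mn (rem - hi * (k - 1))) * k ≤ rem :=
      (PySem.Int.le_floordiv_iff_mul_le hbpos).mp hbt
    have h2 : rem - hi * (k - 1) ≤ max mn (rem - hi * (k - 1)) := le_max_right _ _
    have h3 : hi < max mn (rem - hi * (k - 1)) := by omega
    nlinarith

-- invariant of B's level loop, against A on range zones
theorem loop_inv (hi : Int) : ∀ (k : Int), 1 ≤ k →
    ∀ states : List (List Int × Int × Int),
    ((pvLevels hi k states).filter
        (fun s => decide (s.2.1 ≤ s.2.2 ∧ s.2.2 ≤ hi))).map (fun s => s.1 ++ [s.2.2]) =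
      states.flatMap (fun s =>
        (possible_plus_rng s.2.1 hi k s.2.2).map (fun c => s.1 ++ c)) := by
  intro k hk states
  by_cases hk1 : k = 1
  · subst hk1
    rw [pvLevels, if_pos le_rfl, map_filter_eq_flatMap]
    congr 1
    funext s
    rw [A_one]
    by_cases hc : s.2.1 ≤ s.2.2 ∧ s.2.2 ≤ hi
    · rw [if_pos (by simpa using hc), if_pos hc]; rfl
    · rw [if_neg (by simpa using hc), if_neg hc]; rfl
  · have hk2 : 2 ≤ k := by omega
    rw [pvLevels, if_neg (by omega)]
    by_cases hemp : states.isEmpty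
    · rw [if_pos hemp]
      rw [List.isEmpty_iff.mp hemp]
      rfl
    · rw [if_neg hemp, loop_inv hi (k - 1) (by omega) (pvExpand hi states k)]
      rw [pvExpand, List.flatMap_assoc]
      congr 1
      funext s
      rw [List.flatMap_map]
      exact step_eq s.1 hk2
termination_by k _ _ => k.toNat
decreasing_by all_goals omega

-- A on a nonempty zone with blocks ≥ 2 only reads zone[0] and zone[-1]
theorem A_zone_eq_range {zone : List Int} {blocks result : Int}
    (hne : zone ≠ []) (hb : 2 ≤ blocks) :
    possible_plus zone blocks result =
      possible_plus_rng zone.head! zone.getLast! blocks result := by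
  by_cases hle : zone.head! ≤ zone.getLast!
  · rw [possible_plus, if_neg hne, possible_plus_rng,
      if_neg (show ¬ zone.getLast! < zone.head! by omega),
      if_neg (show ¬ blocks = 1 by omega), if_neg (show ¬ blocks = 1 by omega)]
  · have hg : result < zone.head! * blocks ∨ zone.getLast! * blocks < result := by
      by_cases h : result < zone.head! * blocks
      · exact Or.inl h
      · refine Or.inr ?_
        push_neg at h
        have : zone.getLast! * blocks < zone.head! * blocks := by nlinarith
        omega
    rw [possible_plus, if_neg hne, if_pos hg, possible_plus_rng, if_pos (by omega)]

-- ===== VERDICT (by name: the statement is the Claim_ definition above) =====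
theorem possible_plus_spec : Claim_equal_possible_plus := by
  intro zone blocks result _ hpre
  obtain ⟨hne, hpre⟩ := hpre
  unfold Spec_possible_plus possible_plus_alt
  by_cases hb1 : blocks = 1
  · subst hb1
    rw [if_pos rfl, possible_plus, if_neg hne]
    by_cases hg : result < zone.head! * 1 ∨ zone.getLast! * 1 < result
    · rw [if_pos hg, if_neg (by rintro ⟨h1, h2, _⟩; omega)]
    · push_neg at hg
      rw [if_neg (by push_neg; omega), if_pos rfl]
      by_cases hmem : result ∈ zone
      · rw [if_pos hmem, if_pos ⟨by omega, by omega, hmem⟩]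
      · rw [if_neg hmem, if_neg (by rintro ⟨_, _, h⟩; exact hmem h)]
  · by_cases hbpos : 1 ≤ blocks
    · have hb2 : 2 ≤ blocks := by omega
      rw [if_neg hb1, if_neg (show ¬ blocks < 1 by omega),
        loop_inv zone.getLast! blocks (by omega) [([], zone.head!, result)],
        A_zone_eq_range hne hb2]
      simp
    · -- blocks ≤ 0: Pre_ guarantees the bound check fails, so A returns []
      have hg : result < zone.head! * blocks ∨ zone.getLast! * blocks < result := by
        rcases hpre with h | h | h
        · omega
        · left; exact h
        · right; exact h
      rw [if_neg hb1, if_pos (show blocks < 1 by omega), possible_plus,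
        if_neg hne, if_pos hg]
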